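-- pv_equiv track=rewrite | github.com/maxsegan/spatialNanoGPT | run_shakespeare_sweep.py | get_model_category
-- ===== SOURCE A (Python) =====
-- HYPERPARAMS = {
--     "Baseline": [{"l1_scale": 0.0, "weight_decay": 0.0, "spatial_cost_scale": 0.0}],
--
--     "L1_Only": [{"l1_scale": val, "weight_decay": 0.0, "spatial_cost_scale": 0.0}
--                 for val in [0.5, 1, 2, 4, 8, 16, 32, 64, 128]],
--
--     "L2_Only": [{"l1_scale": 0.0, "weight_decay": val, "spatial_cost_scale": 0.0}
--                 for val in [0.1, 0.2, 0.4, 0.8, 1.6, 3.2, 6.4, 12.8, 25.6, 51.2]],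
--
--     "Spatial_Only": [{"l1_scale": 0.0, "weight_decay": 0.0, "spatial_cost_scale": val}
--                      for val in [0.5, 1, 2, 4, 8, 16, 32, 64, 128, 256]],
--
--     "L1_Spatial": [{"l1_scale": l1, "weight_decay": 0.0, "spatial_cost_scale": spatial}
--                    for l1 in [1, 4, 16, 32, 128]
--                    for spatial in [5, 10, 40, 100, 250]],
--
--     "L2_Spatial": [{"l1_scale": 0.0, "weight_decay": l2, "spatial_cost_scale": spatial}
--                    for l2 in [0.1, 0.4, 1, 2.5, 5]
--                    for spatial in [5, 10, 40, 100, 250]],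
--
--     "L1_L2": [{"l1_scale": l1, "weight_decay": l2, "spatial_cost_scale": 0.0}
--               for l1 in [1, 4, 16, 32, 128]
--               for l2 in [0.1, 0.4, 1, 2.5, 5]],
--
--     "All": [{"l1_scale": l1, "weight_decay": l2, "spatial_cost_scale": spatial}
--             for l1 in [1, 4, 16, 32, 128]
--             for l2 in [0.1, 0.4, 1, 2.5, 5]
--             for spatial in [5, 10, 40, 100]],
--
--     "2DSpatial": [{"l1_scale": 0.0, "weight_decay": 0.0, "spatial_cost_scale": spatial, "spatial_d_value": d}
--                  for spatial in [5, 10, 40, 100, 250, 400]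
--                  for d in [0.05, 0.1, 0.2, 0.3, 0.5, 0.75, 1.0, 2.0, 4.0, 10.0, 20.0, 40.0, 80.0]]
-- }
--
-- def get_model_category(model_name):
--     """Extract the category from a model name - handles existing results"""
--     # First, try a direct match with the first component
--     first_part = model_name.split('_')[0]
--
--     if first_part in HYPERPARAMS:
--         return first_part
--
--     # If that fails, try each of the hyperparameter categories as a prefix match
--     for category in HYPERPARAMS.keys():
--         if model_name.startswith(category + "_"):
--             return category
--
--     # If still no match, return Unknown
--     return "Unknown"
-- ===== SOURCE B (Python) =====
-- HYPERPARAMS = {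
--     "Baseline": [{"l1_scale": 0.0, "weight_decay": 0.0, "spatial_cost_scale": 0.0}],
--
--     "L1_Only": [{"l1_scale": val, "weight_decay": 0.0, "spatial_cost_scale": 0.0}
--                 for val in [0.5, 1, 2, 4, 8, 16, 32, 64, 128]],
--
--     "L2_Only": [{"l1_scale": 0.0, "weight_decay": val, "spatial_cost_scale": 0.0}
--                 for val in [0.1, 0.2, 0.4, 0.8, 1.6, 3.2, 6.4, 12.8, 25.6, 51.2]],
--
--     "Spatial_Only": [{"l1_scale": 0.0, "weight_decay": 0.0, "spatial_cost_scale": val}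
--                      for val in [0.5, 1, 2, 4, 8, 16, 32, 64, 128, 256]],
--
--     "L1_Spatial": [{"l1_scale": l1, "weight_decay": 0.0, "spatial_cost_scale": spatial}
--                    for l1 in [1, 4, 16, 32, 128]
--                    for spatial in [5, 10, 40, 100, 250]],
--
--     "L2_Spatial": [{"l1_scale": 0.0, "weight_decay": l2, "spatial_cost_scale": spatial}
--                    for l2 in [0.1, 0.4, 1, 2.5, 5]
--                    for spatial in [5, 10, 40, 100, 250]],
--
--     "L1_L2": [{"l1_scale": l1, "weight_decay": l2, "spatial_cost_scale": 0.0}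
--               for l1 in [1, 4, 16, 32, 128]
--               for l2 in [0.1, 0.4, 1, 2.5, 5]],
--
--     "All": [{"l1_scale": l1, "weight_decay": l2, "spatial_cost_scale": spatial}
--             for l1 in [1, 4, 16, 32, 128]
--             for l2 in [0.1, 0.4, 1, 2.5, 5]
--             for spatial in [5, 10, 40, 100]],
--
--     "2DSpatial": [{"l1_scale": 0.0, "weight_decay": 0.0, "spatial_cost_scale": spatial, "spatial_d_value": d}
--                  for spatial in [5, 10, 40, 100, 250, 400]
--                  for d in [0.05, 0.1, 0.2, 0.3, 0.5, 0.75, 1.0, 2.0, 4.0, 10.0, 20.0, 40.0, 80.0]]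
-- }
--
--
-- def get_model_category(model_name):
--     """Extract the category from a model name by looking up '_'-token prefixes
--     of the name directly in HYPERPARAMS, instead of scanning every category
--     key with startswith."""
--     parts = model_name.split('_')
--     if parts[0] in HYPERPARAMS:
--         return parts[0]
--     for i in range(2, len(parts) + 1):
--         candidate = '_'.join(parts[:i])
--         if candidate in HYPERPARAMS:
--             return candidate
--     return "Unknown"
-- ===== Notes on version B (the rewrite author's own statement) =====
-- stated objective: alternative
-- what changed: B splits the name into underscore-separated tokens once and looks up each growing token-prefix directly in the HYPERPARAMS dict, instead of A's linear scan over all category keys testing startswith(category + sep).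
-- intended difference: On a model name that IS exactly a multi-token category name (L1_Only, L2_Only, Spatial_Only, L1_Spatial, L2_Spatial, L1_L2) A returns Unknown because it only tests the name with a trailing separator appended, while B returns the category name itself, which is the intended category of such a model. — e.g. on get_model_category("L1_Only"): A returns "Unknown", B returns "L1_Only"
import Mathlib
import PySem

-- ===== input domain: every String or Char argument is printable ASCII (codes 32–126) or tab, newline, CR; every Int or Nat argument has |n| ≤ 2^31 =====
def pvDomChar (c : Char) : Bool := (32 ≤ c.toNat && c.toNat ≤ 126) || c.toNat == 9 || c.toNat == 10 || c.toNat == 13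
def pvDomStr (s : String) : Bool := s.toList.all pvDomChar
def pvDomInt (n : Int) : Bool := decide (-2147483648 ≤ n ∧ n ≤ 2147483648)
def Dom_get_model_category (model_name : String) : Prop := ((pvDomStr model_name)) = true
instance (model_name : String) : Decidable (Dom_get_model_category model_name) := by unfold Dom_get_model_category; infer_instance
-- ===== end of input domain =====

-- B replaces A's startswith scan over all category keys by direct lookups of the name's
-- growing '_'-token prefixes (objective: alternative decomposition; it also fixes A's
-- wrong Unknown answer on a name that IS exactly a multi-token category name).
-- HYPERPARAMS maps category names to lists of float-hyperparameter dicts; the values are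
-- never read by get_model_category, so only the key list (in dict order) is ported.
def hyperparamKeys : List String :=
  ["Baseline", "L1_Only", "L2_Only", "Spatial_Only", "L1_Spatial", "L2_Spatial",
   "L1_L2", "All", "2DSpatial"]

-- ===== PORT A =====
-- model_name.split('_') raises only for an empty separator, so split? is always `some`
-- here (getD [] is never taken); split('_') is never empty, so index [0] always succeeds.
def get_model_category (model_name : String) : String :=
  let first_part := ((PySem.Str.split? model_name "_").getD []).headD ""
  if hyperparamKeys.contains first_part then first_part
  else
    match hyperparamKeys.find? (fun category => PySem.Str.startswith model_name (category ++ "_")) with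
    | some category => category
    | none => "Unknown"

-- ===== PORT B =====
-- Source B's `for i in range(2, len(parts) + 1)` loop with its early return; the second
-- argument counts the remaining iterations (range(2, len+1) has len - 1 elements).
def altPrefixLoop (parts : List String) (i : Nat) : Nat → String
  | 0 => "Unknown"
  | fuel + 1 =>
    let candidate := PySem.Str.join "_" (parts.take i)
    if hyperparamKeys.contains candidate then candidate
    else altPrefixLoop parts (i + 1) fuel

def get_model_category_alt (model_name : String) : String :=
  let parts := (PySem.Str.split? model_name "_").getD []
  if hyperparamKeys.contains (parts.headD "") then parts.headD ""
  else altPrefixLoop parts 2 (parts.length - 1)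

-- ===== PRECONDITION & SPEC =====
-- On a model name that IS exactly a multi-token category name A returns Unknown,
-- because it only tests the name with a trailing separator appended, while B returns
-- the category name itself, which is the intended category of such a model.
def D_get_model_category (model_name : String) : Prop :=
  model_name = "L1_Only" ∨ model_name = "L2_Only" ∨ model_name = "Spatial_Only" ∨
  model_name = "L1_Spatial" ∨ model_name = "L2_Spatial" ∨ model_name = "L1_L2"
instance (model_name : String) : Decidable (D_get_model_category model_name) := by
  unfold D_get_model_category; infer_instance

def Spec_get_model_category (model_name : String) (out : String) : Prop :=
  ¬ D_get_model_category model_name → out = get_model_category_alt model_name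
instance (model_name : String) (out : String) : Decidable (Spec_get_model_category model_name out) := by
  unfold Spec_get_model_category; infer_instance

def pvDiffWitness_get_model_category : String := "L1_Only"
def pvDiffWitnessOut_get_model_category : String × String := ("Unknown", "L1_Only")

-- ===== CLAIM (what is proved, stated in full; the proofs are below) =====
def Claim_unchanged_get_model_category : Prop := ∀ (model_name : String), Dom_get_model_category model_name → Spec_get_model_category model_name (get_model_category model_name)
def Claim_changed_get_model_category : Prop := Dom_get_model_category (pvDiffWitness_get_model_category) ∧ D_get_model_category (pvDiffWitness_get_model_category) ∧ get_model_category (pvDiffWitness_get_model_category) = pvDiffWitnessOut_get_model_category.1 ∧ get_model_category_alt (pvDiffWitness_get_model_category) = pvDiffWitnessOut_get_model_category.2 ∧ pvDiffWitnessOut_get_model_category.1 ≠ pvDiffWitnessOut_get_model_category.2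
def Claim_exact_get_model_category : Prop := ∀ (model_name : String), Dom_get_model_category model_name → D_get_model_category model_name → get_model_category model_name ≠ get_model_category_alt model_name

-- ===== LEMMAS AND PROOFS =====

-- PySem.Chars.splitOn on the one-character separator is Mathlib's List.splitOn.
theorem pvGoEq (fuel : Nat) (l cur : List Char) (acc : List (List Char)) (h : l.length < fuel) :
    PySem.Chars.splitOn.go ['_'] fuel l cur acc
      = acc.reverse ++ List.modifyHead (cur.reverse ++ ·) (List.splitOn '_' l) := by
  induction fuel generalizing l cur acc with
  | zero => omega
  | succ fuel ih =>
    cases l with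
    | nil =>
      simp [PySem.Chars.splitOn.go, List.splitOn, List.splitOnP, List.splitOnP.go]
    | cons c rest =>
      rw [PySem.Chars.splitOn.go.eq_def]
      by_cases hc : c = '_'
      · subst hc
        simp only [List.isPrefixOf, BEq.rfl, Bool.true_and, if_pos]
        rw [show List.drop ['_'].length ('_'::rest) = rest from rfl]
        rw [ih rest [] (cur.reverse :: acc) (by simpa using h)]
        have hne := List.splitOnP_ne_nil (fun x => x == '_') rest
        simp [List.splitOn, List.splitOnP_cons]
        cases hsp : List.splitOnP (fun x => x == '_') rest with
        | nil => exact absurd hsp hne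
        | cons hd tl => simp
      · have hpre : List.isPrefixOf ['_'] (c :: rest) = false := by
          simp [List.isPrefixOf]; intro hh; exact absurd hh.symm hc
        simp only [hpre, if_neg, Bool.false_eq_true, not_false_iff]
        rw [ih rest (c :: cur) acc (by simpa using h)]
        have hne := List.splitOnP_ne_nil (fun x => x == '_') rest
        simp [List.splitOn, List.splitOnP_cons, hc]
        cases hsp : List.splitOnP (fun x => x == '_') rest with
        | nil => exact absurd hsp hne
        | cons hd tl => simp

theorem pvSplitOnEq (cs : List Char) :
    PySem.Chars.splitOn cs ['_'] = List.splitOn '_' cs := by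
  rw [PySem.Chars.splitOn, pvGoEq _ _ _ _ (by omega)]
  have hne := List.splitOnP_ne_nil (fun x => x == '_') cs
  simp [List.splitOn]
  cases hsp : List.splitOnP (fun x => x == '_') cs with
  | nil => exact absurd hsp hne
  | cons hd tl => simp

-- every piece of split('_') is '_'-free
theorem pvNotMemSplitOn (cs : List Char) : ∀ p ∈ List.splitOn '_' cs, '_' ∉ p := by
  induction cs with
  | nil => simp [List.splitOn, List.splitOnP, List.splitOnP.go]
  | cons c rest ih =>
    intro p hp
    rw [List.splitOn, List.splitOnP_cons] at hp
    by_cases hc : c = '_'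
    · simp [hc] at hp
      rcases hp with rfl | hp
      · simp
      · exact ih p hp
    · have hne := List.splitOnP_ne_nil (fun x => x == '_') rest
      rw [if_neg (by simp [hc])] at hp
      cases hsp : List.splitOnP (fun x => x == '_') rest with
      | nil => exact absurd hsp hne
      | cons hd tl =>
        rw [hsp] at hp
        simp only [List.modifyHead, List.mem_cons] at hp
        rcases hp with rfl | hp
        · intro hmem
          rcases List.mem_cons.mp hmem with h | h
          · exact hc h.symm
          · exact ih hd (by rw [List.splitOn, hsp]; exact List.mem_cons_self) h
        · exact ih p (by rw [List.splitOn, hsp]; exact List.mem_cons_of_mem _ hp)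

-- peeling the first '_'-free piece off split('_')
theorem pvSplitOnAppend (a b : List Char) (ha : '_' ∉ a) :
    List.splitOn '_' (a ++ '_' :: b) = a :: List.splitOn '_' b := by
  induction a with
  | nil => simp [List.splitOn, List.splitOnP_cons]
  | cons c cs ih =>
    have hc : c ≠ '_' := fun h => ha (h ▸ List.mem_cons_self)
    have ih' := ih (fun h => ha (List.mem_cons_of_mem _ h))
    rw [List.cons_append, List.splitOn, List.splitOnP_cons, if_neg (by simp [hc])]
    rw [List.splitOn] at ih'
    rw [ih']
    simp [List.modifyHead]

-- a '_'-joined list of i pieces contains at least i - 1 underscores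
theorem pvCountIntercalate (ps : List (List Char)) :
    ps.length - 1 ≤ (List.intercalate ['_'] ps).count '_' := by
  induction ps with
  | nil => simp
  | cons p ps ih =>
    cases ps with
    | nil => simp
    | cons q qs =>
      have hIc : List.intercalate ['_'] (p :: q :: qs)
          = p ++ ['_'] ++ List.intercalate ['_'] (q :: qs) := by
        simp [List.intercalate, List.intersperse]
      rw [hIc]
      simp only [List.count_append, List.length_cons]
      have h1 : List.count '_' ['_'] = 1 := by simp
      have h2 : (q :: qs).length = qs.length + 1 := rfl
      omega

-- find? on a list with a unique satisfier
theorem pvFindUnique {α : Type} (p : α → Bool) (K : List α) (c : α) (hc : c ∈ K)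
    (hp : p c = true) (hu : ∀ c' ∈ K, p c' = true → c' = c) : K.find? p = some c := by
  induction K with
  | nil => cases hc
  | cons k ks ih =>
    rcases eq_or_ne k c with rfl | hne
    · simp [List.find?_cons_of_pos, hp]
    · have hk : ¬ p k = true := fun h => hne (hu k List.mem_cons_self h)
      rw [List.find?_cons_of_neg hk]
      rcases List.mem_cons.mp hc with h | h
      · exact absurd h.symm hne
      · exact ih h (fun c' h hp' => hu c' (List.mem_cons_of_mem _ h) hp')

-- no two distinct category keys can both (with '_' appended) be prefixes of one string
theorem pvPairPrefix : ∀ c ∈ hyperparamKeys, ∀ c' ∈ hyperparamKeys,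
    (c.toList ++ ['_'] <+: c'.toList ++ ['_']) → c = c' := by decide

-- every category key contains at most one '_'
theorem pvKeyCount : ∀ c ∈ hyperparamKeys, c.toList.count '_' ≤ 1 := by decide

-- the keys containing a '_' are exactly the six names of D_
theorem pvMultiKey : ∀ c ∈ hyperparamKeys, '_' ∈ c.toList → D_get_model_category c := by
  decide

-- Python's split('_') at the String level, rewritten through List.splitOn
theorem pvSplitBridge (m : String) :
    (PySem.Str.split? m "_").getD [] = (List.splitOn '_' m.toList).map String.ofList := by
  have h := PySem.Str.split?_map m "_"
  have h2 : PySem.Chars.split? m.toList "_".toList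
      = some (List.splitOn '_' m.toList) := by
    simp [PySem.Chars.split?, show ("_" : String).toList = ['_'] from rfl, pvSplitOnEq]
  rw [h2] at h
  cases hs : PySem.Str.split? m "_" with
  | none => rw [hs] at h; simp at h
  | some l =>
    rw [hs] at h
    simp only [Option.map_some, Option.some.injEq] at h
    simp only [Option.getD_some]
    rw [← h, List.map_map]
    have : l.map (String.ofList ∘ String.toList) = l.map id :=
      List.map_congr_left (fun x _ => String.ofList_toList)
    rw [this, List.map_id]

-- exhausted prefix loop
theorem pvLoopUnknown (parts : List String) (i fuel : Nat)
    (h : ∀ j, i ≤ j → j < i + fuel →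
        hyperparamKeys.contains (PySem.Str.join "_" (parts.take j)) = false) :
    altPrefixLoop parts i fuel = "Unknown" := by
  induction fuel generalizing i with
  | zero => rfl
  | succ fuel ih =>
    show (if hyperparamKeys.contains (PySem.Str.join "_" (parts.take i))
        then PySem.Str.join "_" (parts.take i) else altPrefixLoop parts (i + 1) fuel) = "Unknown"
    rw [h i le_rfl (by omega), if_neg (by simp)]
    exact ih (i + 1) (fun j h1 h2 => h j (by omega) (by omega))

-- String.toList is injective (via String.ofList_toList)
theorem pvToListInj {s t : String} (h : s.toList = t.toList) : s = t := by
  have := congrArg String.ofList h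
  rwa [String.ofList_toList, String.ofList_toList] at this

-- ['_'].intercalate on two or more pieces
theorem pvIc2 (x y : List Char) (zs : List (List Char)) :
    ['_'].intercalate (x :: y :: zs) = x ++ '_' :: ['_'].intercalate (y :: zs) := by
  simp [List.intercalate, List.intersperse]

-- ===== VERDICT (by name: the statement is the Claim_ definition above) =====
set_option maxHeartbeats 1600000 in
theorem get_model_category_spec : Claim_unchanged_get_model_category := by
  intro m _
  unfold Spec_get_model_category
  intro hD
  have hsb := pvSplitBridge m
  set P := List.splitOn '_' m.toList with hPdef
  have hPne : P ≠ [] := List.splitOnP_ne_nil _ _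
  have hfree : ∀ p ∈ P, '_' ∉ p := pvNotMemSplitOn m.toList
  have hIc : ['_'].intercalate P = m.toList := List.intercalate_splitOn m.toList '_'
  obtain ⟨a, P', hPP⟩ := List.exists_cons_of_ne_nil hPne
  simp only [get_model_category, get_model_category_alt, hsb, hPP, List.map_cons,
    List.headD_cons]
  by_cases h1 : hyperparamKeys.contains (String.ofList a) = true
  · rw [if_pos h1, if_pos h1]
  · rw [if_neg h1, if_neg h1]
    set parts : List String := String.ofList a :: P'.map String.ofList with hparts
    set cand2 := PySem.Str.join "_" (parts.take 2) with hcand2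
    -- a one-token key matching as a prefix would contradict h1
    have key1 : ∀ (c : String) (t : List Char), hyperparamKeys.contains c = true →
        '_' ∉ c.toList → m.toList = c.toList ++ '_' :: t → False := by
      intro c t hck hfr hm
      have hP2 : P = c.toList :: List.splitOn '_' t := by
        rw [hPdef, hm, pvSplitOnAppend _ _ hfr]
      rw [hPP] at hP2
      have ha : a = c.toList := (List.cons.injEq _ _ _ _ ▸ hP2).1
      apply h1
      rw [ha, String.ofList_toList]
      exact hck
    -- a two-token key matching as a prefix makes cand2 that key
    have key2 : ∀ (c : String) (x y t : List Char), '_' ∉ x → '_' ∉ y →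
        c.toList = x ++ '_' :: y → m.toList = c.toList ++ '_' :: t → cand2 = c := by
      intro c x y t hx hy hctl hm
      have hm' : m.toList = x ++ '_' :: (y ++ '_' :: t) := by
        rw [hm, hctl]; simp
      have hP2 : P = x :: y :: List.splitOn '_' t := by
        rw [hPdef, hm', pvSplitOnAppend _ _ hx, pvSplitOnAppend _ _ hy]
      rw [hPP] at hP2
      have ha : a = x := (List.cons.injEq _ _ _ _ ▸ hP2).1
      have hP' : P' = y :: List.splitOn '_' t := (List.cons.injEq _ _ _ _ ▸ hP2).2
      apply pvToListInj
      rw [hcand2, PySem.Str.toList_join, hparts, hP']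
      simp only [List.map_cons, List.take_succ_cons, List.take_zero, List.map_nil,
        String.toList_ofList]
      rw [show PySem.Chars.join "_".toList [a, y] = ['_'].intercalate [a, y] from rfl,
        pvIc2, ha, hctl]
      simp [List.intercalate]
    by_cases h2 : hyperparamKeys.contains cand2 = true
    · -- the two-token prefix is a key: both sides return cand2
      cases P' with
      | nil =>
        exfalso
        apply h1
        have hce : cand2 = String.ofList a := by
          apply pvToListInj
          rw [hcand2, PySem.Str.toList_join, hparts]
          simp [PySem.Chars.join, List.intercalate, String.toList_ofList]
        rwa [hce] at h2
      | cons b rest =>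
        have hb : '_' ∉ b := hfree b (by rw [hPP]; exact List.mem_cons_of_mem _ List.mem_cons_self)
        have hc2 : cand2.toList = a ++ '_' :: b := by
          rw [hcand2, PySem.Str.toList_join, hparts]
          simp only [List.map_cons, List.take_succ_cons, List.take_zero, List.map_nil,
            String.toList_ofList]
          rw [show PySem.Chars.join "_".toList [a, b] = ['_'].intercalate [a, b] from rfl,
            pvIc2]
          simp [List.intercalate]
        have hmem : cand2 ∈ hyperparamKeys := by simpa using h2
        have hB : altPrefixLoop parts 2 (parts.length - 1) = cand2 := by
          rw [show parts.length - 1 = rest.length + 1 from by simp [hparts]]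
          show (if hyperparamKeys.contains (PySem.Str.join "_" (parts.take 2))
              then PySem.Str.join "_" (parts.take 2)
              else altPrefixLoop parts 3 rest.length) = cand2
          rw [← hcand2, h2]
          simp
        rw [hB]
        cases rest with
        | nil =>
          exfalso
          have hm : m.toList = a ++ '_' :: b := by
            rw [← hIc, hPP, pvIc2]; simp [List.intercalate]
          have hmc : m = cand2 := pvToListInj (by rw [hm, hc2])
          apply hD
          unfold D_get_model_category
          rw [hmc]
          exact pvMultiKey cand2 hmem (by rw [hc2]; simp)
        | cons r rs =>
          have hpre : cand2.toList ++ ['_'] <+: m.toList := by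
            rw [← hIc, hPP, hc2, pvIc2, pvIc2]
            exact ⟨['_'].intercalate (r :: rs), by simp⟩
          have hstart : PySem.Str.startswith m (cand2 ++ "_") = true := by
            rw [PySem.Str.startswith_eq]
            show List.isPrefixOf (cand2 ++ "_").toList m.toList = true
            rw [List.isPrefixOf_iff_prefix, String.toList_append,
              show ("_" : String).toList = ['_'] from rfl]
            exact hpre
          have hfind : hyperparamKeys.find?
              (fun category => PySem.Str.startswith m (category ++ "_")) = some cand2 := by
            apply pvFindUnique _ _ _ hmem hstart
            intro c' hc' hp'
            have hpre' : c'.toList ++ ['_'] <+: m.toList := by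
              rw [PySem.Str.startswith_eq] at hp'
              have hh := (List.isPrefixOf_iff_prefix).mp hp'
              rwa [String.toList_append, show ("_" : String).toList = ['_'] from rfl] at hh
            rcases List.prefix_or_prefix_of_prefix hpre' hpre with h | h
            · exact pvPairPrefix c' hc' cand2 hmem h
            · exact (pvPairPrefix cand2 hmem c' hc' h).symm
          rw [hfind]
    · -- no token-prefix is a key: both sides return "Unknown"
      have hlenP : parts.length = P'.length + 1 := by simp [hparts]
      have hB : altPrefixLoop parts 2 (parts.length - 1) = "Unknown" := by
        apply pvLoopUnknown
        intro j hj1 hj2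
        rcases Nat.eq_or_lt_of_le hj1 with rfl | hj3
        · rw [← hcand2]
          simpa using h2
        · -- j ≥ 3: the candidate holds at least two underscores, no key does
          rw [Bool.eq_false_iff]
          intro hcc
          have hmem : PySem.Str.join "_" (parts.take j) ∈ hyperparamKeys := by simpa using hcc
          have hcount := pvKeyCount _ hmem
          have htl : (PySem.Str.join "_" (parts.take j)).toList
              = ['_'].intercalate ((a :: P').take j) := by
            rw [PySem.Str.toList_join, hparts,
              show String.ofList a :: P'.map String.ofList = (a :: P').map String.ofList
                from by rw [List.map_cons],
              ← List.map_take, List.map_map]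
            simp only [PySem.Chars.join]
            have hmapid : List.map (String.toList ∘ String.ofList) ((a :: P').take j)
                = (a :: P').take j := by
              simp [Function.comp_def]
            rw [hmapid,
              show ("_" : String).toList = ['_'] from rfl]
          have hjlen : ((a :: P').take j).length = j := by
            simp only [List.length_take, List.length_cons]
            omega
          have hge := pvCountIntercalate ((a :: P').take j)
          rw [hjlen] at hge
          rw [htl] at hcount
          omega
      rw [hB]
      have hfind : hyperparamKeys.find?
          (fun category => PySem.Str.startswith m (category ++ "_")) = none := by
        rw [List.find?_eq_none]
        intro c hcK hp
        have hpre : c.toList ++ ['_'] <+: m.toList := by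
          rw [PySem.Str.startswith_eq] at hp
          have hh := (List.isPrefixOf_iff_prefix).mp hp
          rwa [String.toList_append, show ("_" : String).toList = ['_'] from rfl] at hh
        obtain ⟨t, ht⟩ := hpre
        have hm : m.toList = c.toList ++ '_' :: t := by rw [← ht]; simp
        have hcases : c = "Baseline" ∨ c = "L1_Only" ∨ c = "L2_Only" ∨ c = "Spatial_Only" ∨
            c = "L1_Spatial" ∨ c = "L2_Spatial" ∨ c = "L1_L2" ∨ c = "All" ∨ c = "2DSpatial" := by
          simpa [hyperparamKeys] using hcK
        rcases hcases with rfl | rfl | rfl | rfl | rfl | rfl | rfl | rfl | rfl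
        · exact key1 _ t (by decide) (by decide) hm
        · exact absurd (key2 _ "L1".toList "Only".toList t (by decide) (by decide)
            (by decide) hm) (by intro h; rw [h] at h2; exact h2 (by decide))
        · exact absurd (key2 _ "L2".toList "Only".toList t (by decide) (by decide)
            (by decide) hm) (by intro h; rw [h] at h2; exact h2 (by decide))
        · exact absurd (key2 _ "Spatial".toList "Only".toList t (by decide) (by decide)
            (by decide) hm) (by intro h; rw [h] at h2; exact h2 (by decide))
        · exact absurd (key2 _ "L1".toList "Spatial".toList t (by decide) (by decide)
            (by decide) hm) (by intro h; rw [h] at h2; exact h2 (by decide))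
        · exact absurd (key2 _ "L2".toList "Spatial".toList t (by decide) (by decide)
            (by decide) hm) (by intro h; rw [h] at h2; exact h2 (by decide))
        · exact absurd (key2 _ "L1".toList "L2".toList t (by decide) (by decide)
            (by decide) hm) (by intro h; rw [h] at h2; exact h2 (by decide))
        · exact key1 _ t (by decide) (by decide) hm
        · exact key1 _ t (by decide) (by decide) hm
      rw [hfind]
theorem get_model_category_changed : Claim_changed_get_model_category := by
  unfold Claim_changed_get_model_category; decide
theorem get_model_category_tight : Claim_exact_get_model_category := by
  intro m _ hD
  rcases hD with rfl | rfl | rfl | rfl | rfl | rfl <;> decide
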